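-- pv_equiv track=rewrite | github.com/soyukke/lean-unsolved | scripts/erdos89_distinct_distances.py | integer_grid
-- ===== SOURCE A (Python) =====
-- import math
--
-- def integer_grid(n):
--     """n点に最も近い √n × √n 整数格子"""
--     side = int(math.ceil(math.sqrt(n)))
--     points = []
--     for i in range(side):
--         for j in range(side):
--             points.append((i, j))
--             if len(points) == n:
--                 return points
--     return points
-- ===== SOURCE B (Python) =====
-- import math
--
-- def integer_grid(n):
--     """n点に最も近い √n × √n 整数格子"""
--     side = int(math.ceil(math.sqrt(n)))
--     return [divmod(k, side) for k in range(n)]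
-- ===== Notes on version B (the rewrite author's own statement) =====
-- stated objective: simpler
-- what changed: Replaces the nested i/j loops with a length-counting early return by a single comprehension over range(n) mapping each linear index k to divmod(k, side).
import Mathlib
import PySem

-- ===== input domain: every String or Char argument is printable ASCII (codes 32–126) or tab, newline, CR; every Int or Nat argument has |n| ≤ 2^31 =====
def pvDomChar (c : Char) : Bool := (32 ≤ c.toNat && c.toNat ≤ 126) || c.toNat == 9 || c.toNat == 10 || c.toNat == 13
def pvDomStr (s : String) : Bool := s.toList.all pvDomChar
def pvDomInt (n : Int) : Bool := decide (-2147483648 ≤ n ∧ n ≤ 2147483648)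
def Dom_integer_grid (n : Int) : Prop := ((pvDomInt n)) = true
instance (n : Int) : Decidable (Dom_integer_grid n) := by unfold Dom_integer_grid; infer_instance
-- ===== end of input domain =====

-- B replaces A's nested i/j loops with length-counting early return by a single pass over
-- range(n) sending linear index k to divmod(k, side) (objective: simpler; same O(n) cost).

-- int(math.ceil(math.sqrt(n))) for 0 ≤ n: the exact integer ceiling square root, which equals
-- CPython's float sqrt/ceil on the whole admitted domain 0 ≤ n ≤ 2^31 (the float computation is
-- exact there); Python raises ValueError for n < 0 (excluded by Pre_), the 0 returned there is
-- never relied on.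
def pyCeilSqrt (n : Int) : Int :=
  if n ≤ 0 then 0
  else if (Nat.sqrt n.toNat : Int) * (Nat.sqrt n.toNat : Int) = n then (Nat.sqrt n.toNat : Int)
  else (Nat.sqrt n.toNat : Int) + 1

-- ===== PORT A =====
-- inner `for j in range(side)` loop: append (i, j); (points, true) is the early `return points`
-- taken when len(points) == n
def innerA (n i : Int) (js : List Int) (acc : List (Int × Int)) : List (Int × Int) × Bool :=
  match js with
  | [] => (acc, false)
  | j :: rest =>
    let acc' := acc ++ [(i, j)]
    if (acc'.length : Int) = n then (acc', true) else innerA n i rest acc'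

-- outer `for i in range(side)` loop, propagating the inner early return
def outerA (n side : Int) (is : List Int) (acc : List (Int × Int)) : List (Int × Int) :=
  match is with
  | [] => acc
  | i :: rest =>
    let res := innerA n i (PySem.List.pyRange 0 side 1) acc
    if res.2 then res.1 else outerA n side rest res.1

def integer_grid (n : Int) : List (Int × Int) :=
  let side := pyCeilSqrt n
  outerA n side (PySem.List.pyRange 0 side 1) []

-- ===== PORT B =====
def integer_grid_alt (n : Int) : List (Int × Int) :=
  let side := pyCeilSqrt n
  (PySem.List.pyRange 0 n 1).map (fun k => (PySem.Int.floordiv k side, PySem.Int.mod k side))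

-- ===== PRECONDITION & SPEC =====
-- Pre_ excludes n < 0, where Python's math.sqrt raises ValueError (A returns on every n ≥ 0).
def Pre_integer_grid (n : Int) : Prop := 0 ≤ n
instance (n : Int) : Decidable (Pre_integer_grid n) := by unfold Pre_integer_grid; infer_instance
def pvWitness_integer_grid : Int := (5)

def Spec_integer_grid (n : Int) (out : List (Int × Int)) : Prop := out = integer_grid_alt n
instance (n : Int) (out : List (Int × Int)) : Decidable (Spec_integer_grid n out) := by unfold Spec_integer_grid; infer_instance

-- ===== CLAIM (what is proved, stated in full; the proofs are below) =====
def Claim_equal_integer_grid : Prop := ∀ (n : Int), Dom_integer_grid n → Pre_integer_grid n → Spec_integer_grid n (integer_grid n)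

-- ===== LEMMAS AND PROOFS =====

-- row i of the grid, as A's inner loop produces it
def rowMap (S i : Int) : List (Int × Int) := (PySem.List.pyRange 0 S 1).map (fun j => (i, j))

-- A's inner loop appends entries of row i until the total length reaches n (flag = reached n)
lemma innerA_spec (n i : Int) (js : List Int) (acc : List (Int × Int))
    (h : (acc.length : Int) < n) :
    innerA n i js acc =
      (acc ++ (js.take (n - acc.length).toNat).map (fun j => (i, j)),
       decide ((n : Int) ≤ acc.length + js.length)) := by
  induction js generalizing acc with
  | nil =>
    simp only [innerA, List.take_nil, List.map_nil, List.append_nil, List.length_nil]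
    rw [decide_eq_false (by push_cast; omega)]
  | cons j rest ih =>
    simp only [innerA]
    have hL : ((acc ++ [(i, j)]).length : Int) = (acc.length : Int) + 1 := by
      simp [List.length_append]
    by_cases hn : ((acc ++ [(i, j)]).length : Int) = n
    · rw [if_pos hn]
      rw [hL] at hn
      have ht : (n - (acc.length : Int)).toNat = 1 := by omega
      rw [ht]
      simp only [List.take_succ_cons, List.take_zero, List.map_cons, List.map_nil]
      rw [decide_eq_true (by push_cast [List.length_cons]; omega)]
    · rw [if_neg hn]
      rw [hL] at hn
      rw [ih _ (by rw [hL]; omega), hL]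
      have ht : (n - (acc.length : Int)).toNat = (n - ((acc.length : Int) + 1)).toNat + 1 := by
        omega
      rw [ht, List.take_succ_cons, List.map_cons]
      simp only [Prod.mk.injEq, List.append_assoc, List.singleton_append]
      refine ⟨trivial, ?_⟩
      simp only [decide_eq_decide]
      push_cast [List.length_cons]
      omega

-- hence A's outer loop appends the first (n - |acc|) entries of the remaining rows
lemma outerA_spec (n S : Int) (is : List Int) (acc : List (Int × Int))
    (h : (acc.length : Int) < n) :
    outerA n S is acc =
      acc ++ (is.flatMap (fun i => rowMap S i)).take (n - acc.length).toNat := by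
  induction is generalizing acc with
  | nil => simp [outerA]
  | cons i rest ih =>
    simp only [outerA]
    rw [innerA_spec n i _ acc h]
    have hlen : ((PySem.List.pyRange 0 S 1).length : Int) = ((S - 0).toNat : Int) := by
      rw [PySem.List.length_pyRange_one 0 S]
    by_cases hf : (n : Int) ≤ (acc.length : Int) + (PySem.List.pyRange 0 S 1).length
    · rw [decide_eq_true hf]
      have hle : (n - (acc.length : Int)).toNat ≤ (PySem.List.pyRange 0 S 1).length := by
        omega
      simp only [List.flatMap_cons, rowMap]
      rw [List.take_append_of_le_length (by simpa using hle), ← List.map_take]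
      simp
    · rw [decide_eq_false (by exact_mod_cast hf)]
      have hall : (PySem.List.pyRange 0 S 1).length ≤ (n - (acc.length : Int)).toNat := by
        omega
      rw [List.take_of_length_le hall]
      have hacc : ((acc ++ (PySem.List.pyRange 0 S 1).map (fun j => (i, j))).length : Int)
          = (acc.length : Int) + (PySem.List.pyRange 0 S 1).length := by
        simp [List.length_append]
      rw [if_neg (by simp)]
      rw [ih _ (by rw [hacc]; omega)]
      rw [hacc]
      simp only [List.flatMap_cons, rowMap]
      have hrow : List.take (n - (acc.length : Int)).toNat
            ((PySem.List.pyRange 0 S 1).map (fun j => (i, j)))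
          = (PySem.List.pyRange 0 S 1).map (fun j => (i, j)) :=
        List.take_of_length_le (by rw [List.length_map]; exact hall)
      rw [List.take_append, hrow, ← List.append_assoc]
      congr 2
      simp only [List.length_map]
      omega

-- one row of B: [divmod(k, S) for k in range(i*S, (i+1)*S)] = [(i, j) for j in range(S)]
lemma row_divmod (S i : Int) (hS : 0 < S) :
    (PySem.List.pyRange (i * S) ((i + 1) * S) 1).map
        (fun k => (PySem.Int.floordiv k S, PySem.Int.mod k S)) = rowMap S i := by
  rw [rowMap, PySem.List.pyRange_one (i * S) ((i + 1) * S), PySem.List.pyRange_one 0 S]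
  have hd : ((i + 1) * S - i * S).toNat = (S - 0).toNat := by
    have h : (i + 1) * S - i * S = S := by ring
    rw [h]; omega
  rw [hd, List.map_map, List.map_map]
  apply List.map_congr_left
  intro k hk
  rw [List.mem_range] at hk
  have hkS : (k : Int) < S := by omega
  have hfd : PySem.Int.floordiv (i * S + (k : Int)) S = i := by
    rw [PySem.Int.floordiv_eq_iff_of_pos hS]
    constructor
    · omega
    · nlinarith
  have hmd : PySem.Int.mod (i * S + (k : Int)) S = (k : Int) := by
    have hh := PySem.Int.floordiv_mul_add_mod (i * S + (k : Int)) S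
    rw [hfd] at hh
    omega
  simp [hfd, hmd]

-- the whole grid, rows i..S-1, is divmod of the linear range i*S..S*S
lemma grid_flatMap (S : Int) (hS : 0 < S) :
    ∀ (d : Nat) (i : Int), 0 ≤ i → i + (d : Int) = S →
    (PySem.List.pyRange i S 1).flatMap (fun r => rowMap S r) =
      (PySem.List.pyRange (i * S) (S * S) 1).map
        (fun k => (PySem.Int.floordiv k S, PySem.Int.mod k S)) := by
  intro d
  induction d with
  | zero =>
    intro i hi hiS
    have h : i = S := by omega
    subst h
    rw [PySem.List.pyRange_one_eq_nil (le_refl i), PySem.List.pyRange_one_eq_nil (le_refl (i * i))]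
    simp
  | succ d ih =>
    intro i hi hiS
    have hlt : i < S := by push_cast at hiS; omega
    rw [PySem.List.pyRange_one_cons hlt, List.flatMap_cons]
    rw [ih (i + 1) (by omega) (by push_cast at hiS ⊢; omega)]
    have h1 : i * S ≤ (i + 1) * S := by nlinarith
    have h2 : (i + 1) * S ≤ S * S := by nlinarith
    rw [PySem.List.pyRange_one_append (i * S) ((i + 1) * S) (S * S) h1 h2, List.map_append]
    rw [row_divmod S i hS]

lemma pyCeilSqrt_nonneg (n : Int) : 0 ≤ pyCeilSqrt n := by
  unfold pyCeilSqrt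
  split_ifs <;> positivity

lemma pyCeilSqrt_sq_ge (n : Int) (hn : 0 ≤ n) : n ≤ pyCeilSqrt n * pyCeilSqrt n := by
  unfold pyCeilSqrt
  split_ifs with h0 hsq
  · omega
  · omega
  · have h1 : n.toNat < (n.toNat.sqrt + 1) * (n.toNat.sqrt + 1) := Nat.lt_succ_sqrt n.toNat
    have h2 : (n : Int) < (((n.toNat.sqrt + 1) * (n.toNat.sqrt + 1) : Nat) : Int) := by
      omega
    push_cast at h2 ⊢
    nlinarith [h2]

lemma pyCeilSqrt_pos (n : Int) (hn : 0 < n) : 0 < pyCeilSqrt n := by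
  have h := pyCeilSqrt_sq_ge n (le_of_lt hn)
  have h0 := pyCeilSqrt_nonneg n
  nlinarith

-- ===== VERDICT (by name: the statement is the Claim_ definition above) =====
theorem integer_grid_spec : Claim_equal_integer_grid := by
  intro n _hDom hPre
  unfold Spec_integer_grid
  have hn : 0 ≤ n := hPre
  unfold integer_grid integer_grid_alt
  by_cases hz : n = 0
  · subst hz
    have hs : pyCeilSqrt 0 = 0 := by unfold pyCeilSqrt; simp
    rw [hs, PySem.List.pyRange_one_eq_nil (le_refl 0)]
    simp [outerA]
  · have hpos : 0 < n := lt_of_le_of_ne hn (Ne.symm hz)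
    have hS : 0 < pyCeilSqrt n := pyCeilSqrt_pos n hpos
    have hsq : n ≤ pyCeilSqrt n * pyCeilSqrt n := pyCeilSqrt_sq_ge n hn
    generalize hG : pyCeilSqrt n = S at hS hsq ⊢
    rw [outerA_spec n S _ [] (by simpa using hpos)]
    rw [grid_flatMap S hS (S - 0).toNat 0 (le_refl 0) (by omega)]
    simp only [List.nil_append, List.length_nil, Nat.cast_zero, sub_zero, zero_mul]
    rw [← List.map_take]
    congr 1
    rw [PySem.List.pyRange_one 0 (S * S), PySem.List.pyRange_one 0 n, ← List.map_take,
        List.take_range]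
    have hmin : min n.toNat (S * S - 0).toNat = (n - 0).toNat := by omega
    rw [hmin]
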